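-- pv_equiv track=rewrite | github.com/Lunare-dot/Quinto-Semestre | Novas Tecnologias/Aula/Lista003/Q2.py | fCount
-- ===== SOURCE A (Python) =====
-- from typing import List, Dict
--
-- def fCount(values: List[int], threshold: int) -> List[int]:
--     count: Dict[int, int] = {}
--
--     for num in values:
--         if num in count:
--             count[num] += 1
--         else:
--             count[num] = 1
--
--     x: List[int] = []
--     for num, freq in count.items():
--         if freq >= threshold:
--             x.append(num)
--
--     return x
-- ===== SOURCE B (Python) =====
-- def fCount(values, threshold):
--     result = []
--     seen = set()
--     for num in values:
--         if num not in seen: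
--             seen.add(num)
--             if values.count(num) >= threshold:
--                 result.append(num)
--     return result
-- ===== Notes on version B (the rewrite author's own statement) =====
-- stated objective: alternative
-- what changed: Replaces the frequency dict (build counts, then iterate items) with a single ordered scan over values keeping a seen-set and computing each new value's frequency by values.count, appending directly; the count table and the second items loop disappear.
import Mathlib
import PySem

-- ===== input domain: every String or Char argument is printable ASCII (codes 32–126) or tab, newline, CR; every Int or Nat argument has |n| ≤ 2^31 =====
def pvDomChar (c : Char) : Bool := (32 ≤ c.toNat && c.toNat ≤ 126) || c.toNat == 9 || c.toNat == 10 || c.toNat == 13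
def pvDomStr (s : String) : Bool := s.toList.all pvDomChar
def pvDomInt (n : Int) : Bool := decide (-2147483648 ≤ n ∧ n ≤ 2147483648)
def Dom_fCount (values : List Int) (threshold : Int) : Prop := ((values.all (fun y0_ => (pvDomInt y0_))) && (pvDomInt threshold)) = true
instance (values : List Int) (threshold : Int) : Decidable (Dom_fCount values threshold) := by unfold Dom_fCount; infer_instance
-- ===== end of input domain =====

-- B replaces A's two-pass frequency-dict algorithm by one ordered scan with a seen-set
-- and per-new-value values.count scans (alternative decomposition, same results).

-- ===== PORT A =====
def fCount (values : List Int) (threshold : Int) : List Int :=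
  (values.foldl (fun d num =>
      if d.contains num then d.modify num 0 (· + 1) else d.insert num 1)
      PySem.Dict.empty).items.foldl (fun x kv => if kv.2 ≥ threshold then x ++ [kv.1] else x) []

-- ===== PORT B =====
def fCount_alt (values : List Int) (threshold : Int) : List Int :=
  (values.foldl (fun st num =>
      if PySem.Set.contains st.1 num then st
      else (PySem.Set.add st.1 num,
            if (values.count num : Int) ≥ threshold then st.2 ++ [num] else st.2))
    ((PySem.Set.empty : PySem.Set Int), ([] : List Int))).2

-- ===== PRECONDITION & SPEC =====
def Spec_fCount (values : List Int) (threshold : Int) (out : List Int) : Prop := out = fCount_alt values threshold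
instance (values : List Int) (threshold : Int) (out : List Int) : Decidable (Spec_fCount values threshold out) := by unfold Spec_fCount; infer_instance

-- ===== CLAIM (what is proved, stated in full; the proofs are below) =====
def Claim_equal_fCount : Prop := ∀ (values : List Int) (threshold : Int), Dom_fCount values threshold → Spec_fCount values threshold (fCount values threshold)

-- ===== LEMMAS AND PROOFS =====

-- first occurrences of l not already in seen, in order (the keys B appends while scanning)
def pvNewKeys (seen : PySem.Set Int) : List Int → List Int
  | [] => []
  | x :: l => if PySem.Set.contains seen x then pvNewKeys seen l
              else x :: pvNewKeys (PySem.Set.add seen x) l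

theorem pvA_dict_eq_counter (l : List Int) (d : PySem.Dict Int Int) :
    l.foldl (fun d num =>
      if d.contains num then d.modify num 0 (· + 1) else d.insert num 1) d
    = l.foldl (fun d x => d.modify x 0 (· + 1)) d := by
  induction l generalizing d with
  | nil => rfl
  | cons x l ih =>
    simp only [List.foldl_cons]
    have hstep : (if d.contains x then d.modify x 0 (· + 1) else d.insert x 1)
        = d.modify x 0 (· + 1) := by
      by_cases h : d.contains x
      · simp [h]
      · simp only [Bool.not_eq_true] at h
        simp [h, PySem.Dict.modify, PySem.Dict.getD_of_not_contains d 0 h]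
    rw [hstep, ih]

theorem pvB_fold_eq (p : Int → Bool) (l : List Int) (seen : PySem.Set Int) (out : List Int) :
    (l.foldl (fun st num =>
        if PySem.Set.contains st.1 num then st
        else (PySem.Set.add st.1 num, if p num then st.2 ++ [num] else st.2))
      (seen, out)).2
    = out ++ (pvNewKeys seen l).filter p := by
  induction l generalizing seen out with
  | nil => simp [pvNewKeys]
  | cons x l ih =>
    simp only [List.foldl_cons]
    by_cases h : x ∈ seen
    · have hc : PySem.Set.contains seen x = true := by simp [PySem.Set.contains, h]
      simp only [hc, if_true, pvNewKeys]
      exact ih seen out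
    · have hc : PySem.Set.contains seen x = false := by simp [PySem.Set.contains, h]
      simp only [hc, Bool.false_eq_true, if_false, pvNewKeys]
      by_cases hp : p x
      · simp only [hp, if_true, ih, List.filter_cons]
        simp
      · simp only [hp, Bool.false_eq_true, if_false, ih, List.filter_cons]

theorem pvFoldlAdd_eq_append_newKeys (l : List Int) (seen : PySem.Set Int) :
    List.foldl PySem.Set.add seen l = seen ++ pvNewKeys seen l := by
  induction l generalizing seen with
  | nil => simp [pvNewKeys]
  | cons x l ih =>
    by_cases h : x ∈ seen
    · simp [List.foldl_cons, pvNewKeys, PySem.Set.contains, h, ih]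
    · simp [List.foldl_cons, pvNewKeys, PySem.Set.contains, h, ih]

theorem pvNewKeys_nil_eq_ofList (l : List Int) :
    pvNewKeys PySem.Set.empty l = PySem.Set.ofList l := by
  have h := pvFoldlAdd_eq_append_newKeys l PySem.Set.empty
  simp only [PySem.Set.empty] at h
  rw [← PySem.Set.ofList_eq_foldl] at h
  simpa using h.symm

-- ===== VERDICT (by name: the statement is the Claim_ definition above) =====
theorem fCount_spec : Claim_equal_fCount := by
  intro values threshold _
  unfold Spec_fCount fCount fCount_alt
  rw [pvA_dict_eq_counter, ← PySem.Dict.counter_eq_foldl, PySem.Dict.items_counter,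
    List.foldl_map]
  rw [show (fun (st : PySem.Set Int × List Int) (num : Int) =>
        if PySem.Set.contains st.1 num then st
        else (PySem.Set.add st.1 num,
              if (values.count num : Int) ≥ threshold then st.2 ++ [num] else st.2))
      = (fun st num =>
        if PySem.Set.contains st.1 num then st
        else (PySem.Set.add st.1 num,
              if (fun k => decide ((values.count k : Int) ≥ threshold)) num = true
              then st.2 ++ [num] else st.2)) from by funext st num; simp]
  rw [pvB_fold_eq, pvNewKeys_nil_eq_ofList]
  rw [show (fun (x : List Int) (y : Int) =>
        if ((y, (values.count y : Int)) : Int × Int).2 ≥ threshold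
        then x ++ [((y, (values.count y : Int)) : Int × Int).1] else x)
      = (fun x y =>
        if (fun k => decide ((values.count k : Int) ≥ threshold)) y = true
        then x ++ [id y] else x) from by funext x y; simp]
  rw [PySem.List.foldl_append_if]
  simp
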